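-- pv_equiv track=rewrite | github.com/JiwanChung/slurm-monitor | src/slurm_monitor/gpustat.py | parse_node_names
-- ===== SOURCE A (Python) =====
-- def split_node_str(node_str):
--     """Split SLURM node specifications into node_specs. Here a node_spec defines a range
--     of nodes that share the same naming scheme (and are grouped together using square
--     brackets).   E.g. 'node[1-3,4,6-9]' represents a single node_spec.
--
--     Examples:
--        A `node_str` of the form 'node[001-003]' will be returned as a single element
--            list: ['node[001-003]']
--        A `node_str` of the form 'node[001-002],node004' will be split into
--            ['node[001-002]', 'node004']
--
--     Args:
--         node_str (str): a SLURM-formatted list of nodes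
--
--     Returns:
--         (list[str]): SLURM node specs.
--     """
--     node_str = node_str.strip()
--     breakpoints, stack = [0], []
--     for ii, char in enumerate(node_str):
--         if char == "[":
--             stack.append(char)
--         elif char == "]":
--             stack.pop()
--         elif not stack and char == ",":
--             breakpoints.append(ii + 1)
--     end = len(node_str) + 1
--     return [
--         node_str[i:j - 1] for i, j in zip(breakpoints, breakpoints[1:] + [end])
--     ]
--
-- def parse_node_names(node_str):
--     """Parse the node list produced by the SLURM tools into separate node names.
--
--     Examples:
--        A slurm `node_str` of the form 'node[001-003]' will be split into a list of the
--            form ['node001', 'node002', 'node003'].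
--        A `node_str` of the form 'node[001-002],node004' will be split into
--            ['node001', 'node002', 'node004']
--
--     Args:
--         node_str (str): a SLURM-formatted list of nodes
--
--     Returns:
--         (list[str]): a list of separate node names.
--     """
--     names = []
--     node_specs = split_node_str(node_str)
--     for node_spec in node_specs:
--         if "[" not in node_spec:
--             names.append(node_spec)
--         else:
--             head, tail = node_spec.index("["), node_spec.index("]")
--             prefix = node_spec[:head]
--             subspecs = node_spec[head + 1:tail].split(",")
--             for subspec in subspecs:
--                 if "-" not in subspec:
--                     subnames = [f"{prefix}{subspec}"]
--                 else:
--                     start, end = subspec.split("-")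
--                     num_digits = len(start)
--                     subnames = [
--                         f"{prefix}{str(x).zfill(num_digits)}"
--                         for x in range(int(start),
--                                        int(end) + 1)
--                     ]
--                 names.extend(subnames)
--     return names
-- ===== SOURCE B (Python) =====
-- def parse_node_names(node_str):
--     """Parse a SLURM node list into separate node names (single streaming pass:
--     peel one top-level group at a time instead of precomputing breakpoints)."""
--     names = []
--     rest = node_str.strip()
--     while rest is not None:
--         group, rest = _next_group(rest)
--         _expand_into(names, group)
--     return names
--
--
-- def _next_group(s):
--     """Split off the first top-level (bracket-depth-0) comma-separated group.
--
--     Returns (group, remainder-after-the-comma) or (s, None) if no such comma.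
--     """
--     depth = 0
--     for i, ch in enumerate(s):
--         if ch == '[':
--             depth += 1
--         elif ch == ']':
--             depth -= 1
--         elif ch == ',' and depth == 0:
--             return s[:i], s[i + 1:]
--     return s, None
--
--
-- def _expand_into(names, group):
--     """Append the node names described by one group onto `names`."""
--     i = group.find('[')
--     if i < 0:
--         names.append(group)
--         return
--     prefix = group[:i]
--     j = group.find(']')
--     body = group[i + 1:j]
--     for token in body.split(','):
--         if '-' in token:
--             start, end = token.split('-')
--             width = len(start)
--             for x in range(int(start), int(end) + 1):
--                 names.append(prefix + str(x).zfill(width))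
--         else:
--             names.append(prefix + token)
-- ===== Notes on version B (the rewrite author's own statement) =====
-- stated objective: alternative
-- what changed: Replaces the two-phase pipeline (a full pass collecting breakpoint indices on a bracket-depth stack, then a zip-and-slice comprehension, then expansion of the slices) by a single streaming pass that peels one top-level group at a time with an integer depth counter and expands it immediately into the output list, with no breakpoint list, no stack list and no index slicing arithmetic.
-- outside the precondition, e.g. on parse_node_names(']'): A raises IndexError, B returns [']']
import Mathlib
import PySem

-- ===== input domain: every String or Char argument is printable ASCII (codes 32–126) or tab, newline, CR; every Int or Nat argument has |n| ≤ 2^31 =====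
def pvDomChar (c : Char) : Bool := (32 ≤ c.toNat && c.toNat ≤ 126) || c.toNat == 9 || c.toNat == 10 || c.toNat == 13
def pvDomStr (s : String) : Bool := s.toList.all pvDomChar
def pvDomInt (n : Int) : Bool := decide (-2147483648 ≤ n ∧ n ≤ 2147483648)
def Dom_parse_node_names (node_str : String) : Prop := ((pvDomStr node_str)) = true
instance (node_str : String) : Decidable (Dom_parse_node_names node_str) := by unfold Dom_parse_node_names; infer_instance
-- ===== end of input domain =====

-- B re-implements the SLURM node-list expansion as one streaming pass (peel one top-level
-- group at a time with a depth counter, expand immediately) instead of A's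
-- breakpoint-list + stack + zip-and-slice pipeline; same output, similar cost.

-- ===== PORT A =====

/-- `split_node_str`'s loop `for ii, char in enumerate(node_str)` carrying the
`breakpoints` and `stack` accumulators.  Python's `stack.pop()` raises `IndexError`
on an empty stack; the port keeps `[]` there (such inputs are excluded by `Pre_`). -/
def pvBpsLoop (ii : Nat) (bps : List Nat) (stack : List Char) : List Char → List Nat × List Char
  | [] => (bps, stack)
  | c :: t =>
    if c = '[' then pvBpsLoop (ii + 1) bps ('[' :: stack) t
    else if c = ']' then pvBpsLoop (ii + 1) bps stack.tail t
    else if stack = [] ∧ c = ',' then pvBpsLoop (ii + 1) (bps ++ [ii + 1]) stack t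
    else pvBpsLoop (ii + 1) bps stack t

/-- `split_node_str`: breakpoints, then `node_str[i:j-1]` slices of consecutive pairs. -/
def pvSplitNodeStr (s : List Char) : List (List Char) :=
  let bps := (pvBpsLoop 0 [0] [] s).1
  let endd := s.length + 1
  (bps.zip (bps.tail ++ [endd])).map
    (fun ij => PySem.List.slice s (some (ij.1 : Int)) (some ((ij.2 : Int) - 1)))

/-- Body of A's `for node_spec in node_specs` loop, appending onto `names`.
`node_spec.index("[")` / `.index("]")` raise `ValueError` when absent (excluded by
`Pre_`); the port leaves `names` unchanged there, likewise for the `ValueError`s of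
`start, end = subspec.split("-")` and of `int(...)`. -/
def pvExpandSpecInto (names : List String) (spec : List Char) : List String :=
  if ¬ (PySem.Chars.isIn ['['] spec) then names ++ [String.ofList spec]
  else
    match PySem.List.index? spec '[', PySem.List.index? spec ']' with
    | some head, some tail =>
      let pref := PySem.List.slice spec none (some (head : Int))
      let subs := PySem.Chars.splitOn (PySem.List.slice spec (some ((head : Int) + 1)) (some (tail : Int))) [',']
      subs.foldl (fun names sub =>
        if ¬ (PySem.Chars.isIn ['-'] sub) then names ++ [String.ofList (pref ++ sub)]
        else
          match PySem.Chars.splitOn sub ['-'] with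
          | [st, en] =>
            match PySem.Int.ofChars? st, PySem.Int.ofChars? en with
            | some a, some b =>
              names ++ (PySem.List.pyRange a (b + 1) 1).map
                (fun x => String.ofList (pref ++ PySem.Chars.zfill (PySem.Int.toChars x) st.length))
            | _, _ => names
          | _ => names) names
    | _, _ => names

def parse_node_names (node_str : String) : List String :=
  (pvSplitNodeStr (PySem.Str.strip node_str).toList).foldl pvExpandSpecInto []

-- ===== PORT B =====

/-- `_next_group`: split off the first bracket-depth-0 comma-separated group
(the obvious structural recursion for B's indexed `for` loop over `s`). -/
def pvNextGroup (depth : Int) : List Char → List Char × Option (List Char)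
  | [] => ([], none)
  | c :: t =>
    if c = '[' then
      let r := pvNextGroup (depth + 1) t; (c :: r.1, r.2)
    else if c = ']' then
      let r := pvNextGroup (depth - 1) t; (c :: r.1, r.2)
    else if c = ',' ∧ depth = 0 then ([], some t)
    else
      let r := pvNextGroup depth t; (c :: r.1, r.2)

theorem pvNextGroup_rest_lt (s : List Char) (d : Int) (t : List Char)
    (h : (pvNextGroup d s).2 = some t) : t.length < s.length := by
  induction s generalizing d t with
  | nil => simp [pvNextGroup] at h
  | cons c cs ih =>
    simp only [pvNextGroup] at h
    split_ifs at h
    · exact Nat.lt_succ_of_lt (ih _ _ h)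
    · exact Nat.lt_succ_of_lt (ih _ _ h)
    · simp only [Option.some.injEq] at h; subst h; simp
    · exact Nat.lt_succ_of_lt (ih _ _ h)

/-- `_expand_into`: append the node names of one group onto `names`.
`group.find(']')` may return `-1` (then `group[i+1:-1]` is the body, as in Python);
the two `ValueError` sites leave `names` unchanged (excluded by `Pre_`). -/
def pvExpandInto (names : List String) (group : List Char) : List String :=
  match PySem.List.index? group '[' with
  | none => names ++ [String.ofList group]
  | some i =>
    let pref := PySem.List.slice group none (some (i : Int))
    let j := PySem.Chars.find group [']']
    let body := PySem.List.slice group (some ((i : Int) + 1)) (some j)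
    (PySem.Chars.splitOn body [',']).foldl (fun names tok =>
      if PySem.Chars.isIn ['-'] tok then
        match PySem.Chars.splitOn tok ['-'] with
        | [st, en] =>
          match PySem.Int.ofChars? st, PySem.Int.ofChars? en with
          | some a, some b =>
            (PySem.List.pyRange a (b + 1) 1).foldl
              (fun names x =>
                names ++ [String.ofList (pref ++ PySem.Chars.zfill (PySem.Int.toChars x) st.length)])
              names
          | _, _ => names
        | _ => names
      else names ++ [String.ofList (pref ++ tok)]) names

/-- B's `while rest is not None` loop. -/
def pvParseLoop (rest : List Char) (names : List String) : List String :=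
  match h : pvNextGroup 0 rest with
  | (g, none) => pvExpandInto names g
  | (g, some t) => pvParseLoop t (pvExpandInto names g)
termination_by rest.length
decreasing_by exact pvNextGroup_rest_lt rest 0 t (by rw [h])

def parse_node_names_alt (node_str : String) : List String :=
  pvParseLoop (PySem.Str.strip node_str).toList []

-- ===== PRECONDITION & SPEC =====

/-- The top-level (depth-0) comma-separated groups of `s` (structural one-pass splitter,
used by `Pre_`; `cur` holds the current group reversed). -/
def pvSegsAux (d : Int) (cur : List Char) : List Char → List (List Char)
  | [] => [cur.reverse]
  | c :: t =>
    if c = '[' then pvSegsAux (d + 1) (c :: cur) t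
    else if c = ']' then pvSegsAux (d - 1) (c :: cur) t
    else if c = ',' ∧ d = 0 then cur.reverse :: pvSegsAux 0 [] t
    else pvSegsAux d (c :: cur) t

/-- Brackets never close below depth `d` (Python's `stack.pop()` never sees an empty stack). -/
def pvDepthOk (d : Int) : List Char → Bool
  | [] => true
  | c :: t =>
    if c = '[' then pvDepthOk (d + 1) t
    else if c = ']' then decide (1 ≤ d) && pvDepthOk (d - 1) t
    else pvDepthOk d t

/-- A bracket-body token is literal, or `start-end` with both endpoints `int()`-parsable. -/
def pvTokOk (tok : List Char) : Bool :=
  !(tok.contains '-') ||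
    (match PySem.Chars.splitOn tok ['-'] with
     | [st, en] => (PySem.Int.ofChars? st).isSome && (PySem.Int.ofChars? en).isSome
     | _ => false)

/-- A group without `[` is literal; one with `[` has a `]` after it and valid body tokens. -/
def pvSegOk (seg : List Char) : Bool :=
  !(seg.contains '[') ||
    (match PySem.List.index? seg '[', PySem.List.index? seg ']' with
     | some h, some t =>
       decide (h < t) && (PySem.Chars.splitOn ((seg.drop (h + 1)).take (t - (h + 1))) [',']).all pvTokOk
     | _, _ => false)

-- Pre_ = exactly the inputs on which the Python A returns normally: the stripped string is
-- a well-formed SLURM node list (no unmatched ']', every bracket group closed, every range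
-- token of a bracket body of the form start-end with int()-parsable endpoints); outside it
-- A raises IndexError or ValueError.
def Pre_parse_node_names (node_str : String) : Prop :=
  pvDepthOk 0 (PySem.Str.strip node_str).toList = true ∧
    ((pvSegsAux 0 [] (PySem.Str.strip node_str).toList).all pvSegOk) = true

instance (node_str : String) : Decidable (Pre_parse_node_names node_str) := by
  unfold Pre_parse_node_names; infer_instance

def pvWitness_parse_node_names : String := "node[001-003],node[7,9],node004"

def Spec_parse_node_names (node_str : String) (out : List String) : Prop := out = parse_node_names_alt node_str
instance (node_str : String) (out : List String) : Decidable (Spec_parse_node_names node_str out) := by unfold Spec_parse_node_names; infer_instance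

-- ===== CLAIM (what is proved, stated in full; the proofs are below) =====
def Claim_equal_parse_node_names : Prop := ∀ (node_str : String), Dom_parse_node_names node_str → Pre_parse_node_names node_str → Spec_parse_node_names node_str (parse_node_names node_str)

-- ===== LEMMAS AND PROOFS =====

-- the group splitter seen through `pvNextGroup` (proof-side view of `pvSegsAux`)
def pvSegs (s : List Char) : List (List Char) :=
  match h : pvNextGroup 0 s with
  | (g, none) => [g]
  | (g, some t) => g :: pvSegs t
termination_by s.length
decreasing_by exact pvNextGroup_rest_lt s 0 t (by rw [h])

theorem pvSegsAux_spec (s : List Char) : ∀ (d : Int) (cur : List Char),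
    pvSegsAux d cur s =
      (match pvNextGroup d s with
       | (g, none) => [cur.reverse ++ g]
       | (g, some t) => (cur.reverse ++ g) :: pvSegs t) := by
  induction s with
  | nil => intro d cur; simp [pvSegsAux, pvNextGroup]
  | cons c t ih =>
    intro d cur
    by_cases h1 : c = '['
    · simp only [pvSegsAux, if_pos h1, pvNextGroup]
      rw [ih]
      cases hr : pvNextGroup (d + 1) t with
      | mk g r => cases r <;> simp
    · by_cases h2 : c = ']'
      · simp only [pvSegsAux, if_neg h1, if_pos h2, pvNextGroup]
        rw [ih]
        cases hr : pvNextGroup (d - 1) t with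
        | mk g r => cases r <;> simp
      · by_cases h3 : c = ',' ∧ d = 0
        · simp only [pvSegsAux, if_neg h1, if_neg h2, if_pos h3, pvNextGroup]
          rw [ih 0 [], pvSegs]
          cases hr : pvNextGroup 0 t with
          | mk g r => cases r <;> simp [hr]
        · simp only [pvSegsAux, if_neg h1, if_neg h2, if_neg h3, pvNextGroup]
          rw [ih]
          cases hr : pvNextGroup d t with
          | mk g r => cases r <;> simp

theorem pvSegsAux_eq_pvSegs (s : List Char) : pvSegsAux 0 [] s = pvSegs s := by
  rw [pvSegsAux_spec, pvSegs]
  cases hr : pvNextGroup 0 s with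
  | mk g r => cases r <;> simp

-- reconstruction of the scanned string from one `pvNextGroup` step
theorem pvNextGroup_none_eq (d : Int) (s : List Char)
    (h : (pvNextGroup d s).2 = none) : (pvNextGroup d s).1 = s := by
  induction s generalizing d with
  | nil => rfl
  | cons c t ih =>
    simp only [pvNextGroup] at h ⊢
    split_ifs at h ⊢ <;> simpa using ih _ h

theorem pvNextGroup_some_eq (d : Int) (s : List Char) (t : List Char)
    (h : (pvNextGroup d s).2 = some t) : s = (pvNextGroup d s).1 ++ ',' :: t := by
  induction s generalizing d t with
  | nil => simp [pvNextGroup] at h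
  | cons c u ih =>
    simp only [pvNextGroup] at h ⊢
    split_ifs at h ⊢ with h1 h2 h3
    · simpa using ih _ _ h
    · simpa using ih _ _ h
    · simp only [Option.some.injEq] at h
      subst h; simp [h3.1]
    · simpa using ih _ _ h

-- single-character bridges: `'c' in s` and `s.find('c')` against list membership / index?
theorem pvIsIn_single (c : Char) (s : List Char) :
    PySem.Chars.isIn [c] s = s.contains c := by
  by_cases hm : c ∈ s
  · rw [(PySem.Chars.isIn_iff_infix [c] s).mpr ((List.singleton_infix_iff c s).mpr hm)]
    simp [hm]
  · rw [(PySem.Chars.isIn_eq_false_iff [c] s).mpr (fun h => hm ((List.singleton_infix_iff c s).mp h))]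
    simp [hm]

theorem pvFind_single (s : List Char) (c : Char) :
    PySem.Chars.find s [c] =
      (match PySem.List.index? s c with | none => -1 | some k => (k : Int)) := by
  cases hidx : PySem.List.index? s c with
  | none =>
    rw [PySem.List.index?_eq_none_iff] at hidx
    exact (PySem.Chars.find_eq_neg_one_iff s [c]).mpr
      (fun h => hidx ((List.singleton_infix_iff c s).mp h))
  | some k =>
    show PySem.Chars.find s [c] = (k : Int)
    obtain ⟨pre, suf, hdec, hklen, hnpre⟩ := (PySem.List.index?_eq_some_iff s c k).mp hidx
    have hmem : c ∈ s := by rw [hdec]; simp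
    have hf0 : 0 ≤ PySem.Chars.find s [c] :=
      (PySem.Chars.find_nonneg_iff s [c]).mpr ((List.singleton_infix_iff c s).mpr hmem)
    obtain ⟨hpre, hmin⟩ := PySem.Chars.find_spec hf0
    have hk : [c] <+: s.drop k := by
      rw [hdec, ← hklen, List.drop_left]
      exact ⟨suf, rfl⟩
    have hle : (PySem.Chars.find s [c]).toNat ≤ k := by
      by_contra hgt
      exact hmin k (by omega) hk
    have hge : ¬ ((PySem.Chars.find s [c]).toNat < k) := by
      generalize hfdef : (PySem.Chars.find s [c]).toNat = f at hpre hmin ⊢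
      intro hlt
      obtain ⟨t, ht⟩ := hpre
      have hget : s[f]? = some c := by
        have h0 : (s.drop f)[0]? = some c := by rw [← ht]; rfl
        rw [List.getElem?_drop] at h0
        simpa using h0
      have hpget : pre[f]? = some c := by
        rw [hdec] at hget
        rwa [List.getElem?_append_left (by omega)] at hget
      exact hnpre (List.mem_of_getElem? hpget)
    omega

-- the breakpoint indices A's first pass produces, computed group-wise
def pvBpsAux (d : Int) (ii : Nat) : List Char → List Nat
  | [] => []
  | c :: t =>
    if c = ',' ∧ d = 0 then (ii + 1) :: pvBpsAux 0 (ii + 1) t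
    else pvBpsAux (if c = '[' then d + 1 else if c = ']' then d - 1 else d) (ii + 1) t

theorem pvBpsAux_spec (s : List Char) (d : Int) (ii : Nat) :
    pvBpsAux d ii s =
      (match pvNextGroup d s with
       | (_, none) => []
       | (g, some t) => (ii + g.length + 1) :: pvBpsAux 0 (ii + g.length + 1) t) := by
  induction s generalizing d ii with
  | nil => rfl
  | cons c t ih =>
    by_cases h1 : c = '['
    · have hno : ¬(c = ',' ∧ d = 0) := by simp [h1]
      simp only [pvBpsAux, if_neg hno, if_pos h1, pvNextGroup]
      rw [ih]
      cases hr : pvNextGroup (d + 1) t with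
      | mk g r =>
        cases r with
        | none => simp
        | some t' =>
          simp only [List.length_cons]
          have h2 : ii + 1 + g.length + 1 = ii + (g.length + 1) + 1 := by omega
          rw [h2]
    · by_cases h2 : c = ']'
      · have hno : ¬(c = ',' ∧ d = 0) := by simp [h2]
        simp only [pvBpsAux, if_neg hno, if_neg h1, if_pos h2, pvNextGroup]
        rw [ih]
        cases hr : pvNextGroup (d - 1) t with
        | mk g r =>
          cases r with
          | none => simp
          | some t' =>
            simp only [List.length_cons]
            have h3 : ii + 1 + g.length + 1 = ii + (g.length + 1) + 1 := by omega
            rw [h3]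
      · by_cases h3 : c = ',' ∧ d = 0
        · simp only [pvBpsAux, if_pos h3, pvNextGroup, if_neg h1, if_neg h2, if_pos h3]
          simp
        · simp only [pvBpsAux, if_neg h3, if_neg h1, if_neg h2, pvNextGroup]
          rw [ih]
          cases hr : pvNextGroup d t with
          | mk g r =>
            cases r with
            | none => simp
            | some t' =>
              simp only [List.length_cons]
              have h4 : ii + 1 + g.length + 1 = ii + (g.length + 1) + 1 := by omega
              rw [h4]

theorem pvBpsLoop_eq (s : List Char) (d : Int) (stack : List Char) (ii : Nat) (bps : List Nat)
    (hlen : d = stack.length) (hdep : pvDepthOk d s = true) :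
    (pvBpsLoop ii bps stack s).1 = bps ++ pvBpsAux d ii s := by
  induction s generalizing d stack ii bps with
  | nil => simp [pvBpsLoop, pvBpsAux]
  | cons c t ih =>
    by_cases h1 : c = '['
    · have hno : ¬(c = ',' ∧ d = 0) := by simp [h1]
      have hdep' : pvDepthOk (d + 1) t = true := by
        simpa [pvDepthOk, h1] using hdep
      simp only [pvBpsLoop, if_pos h1, pvBpsAux, if_neg hno, if_pos h1]
      exact ih (d + 1) ('[' :: stack) _ _ (by simp [hlen]) hdep'
    · by_cases h2 : c = ']'
      · have hno : ¬(c = ',' ∧ d = 0) := by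
          rintro ⟨hc, _⟩; exact absurd (hc ▸ h2) (by decide)
        have hdd := hdep
        simp only [pvDepthOk, if_neg h1, if_pos h2, Bool.and_eq_true] at hdd
        have h1d : (1 : Int) ≤ d := of_decide_eq_true hdd.1
        have hdep' : pvDepthOk (d - 1) t = true := hdd.2
        have hlen' : d - 1 = (stack.tail.length : Int) := by
          cases stack with
          | nil => exfalso; rw [hlen] at h1d; simp at h1d
          | cons a u => simp at hlen ⊢; omega
        simp only [pvBpsLoop, if_neg h1, if_pos h2, pvBpsAux, if_neg hno,
          if_neg h1, if_pos h2]
        exact ih (d - 1) stack.tail _ _ hlen' hdep'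
      · by_cases hst : stack = [] ∧ c = ','
        · have hd0 : d = 0 := by rw [hlen, hst.1]; rfl
          have hdep' : pvDepthOk d t = true := by
            simpa [pvDepthOk, h1, h2, hst.2] using hdep
          simp only [pvBpsLoop, if_neg h1, if_neg h2, if_pos hst, pvBpsAux,
            if_pos (⟨hst.2, hd0⟩ : c = ',' ∧ d = 0)]
          rw [ih d stack _ _ hlen hdep']
          simp [hd0]
        · have hno : ¬(c = ',' ∧ d = 0) := by
            rintro ⟨hc, h0⟩
            have : stack = [] := by
              rw [h0] at hlen
              cases stack with
              | nil => rfl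
              | cons a u => exfalso; simp at hlen; omega
            exact hst ⟨this, hc⟩
          have hdep' : pvDepthOk d t = true := by
            simpa [pvDepthOk, h1, h2] using hdep
          simp only [pvBpsLoop, if_neg h1, if_neg h2, if_neg hst, pvBpsAux,
            if_neg hno, if_neg h1, if_neg h2]
          exact ih d stack _ _ hlen hdep'

theorem pvBpsAux_pos (s : List Char) : ∀ (d : Int) (ii : Nat) (j : Nat),
    j ∈ pvBpsAux d ii s → 1 ≤ j := by
  induction s with
  | nil => intro d ii j h; simp [pvBpsAux] at h
  | cons c t ih =>
    intro d ii j h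
    simp only [pvBpsAux] at h
    split_ifs at h
    · rcases List.mem_cons.mp h with h | h
      · omega
      · exact ih _ _ _ h
    all_goals exact ih _ _ _ h

theorem pvSlices_eq_segs (cs : List Char) : ∀ (full : List Char) (off : Nat),
    full.drop off = cs →
    ((off :: pvBpsAux 0 off cs).zip (pvBpsAux 0 off cs ++ [full.length + 1])).map
        (fun ij => (full.drop ij.1).take (ij.2 - 1 - ij.1))
      = pvSegs cs := by
  induction cs using pvSegs.induct with
  | case1 s g h =>
    intro full off hoff
    rw [pvSegs, h]
    have hg : g = s := by
      have := pvNextGroup_none_eq 0 s (by rw [h])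
      rw [h] at this; exact this
    have haux : pvBpsAux 0 off s = [] := by rw [pvBpsAux_spec, h]
    rw [haux]
    simp only [List.zip_cons_cons, List.nil_append, List.zip_nil_right,  List.map_cons,
      List.map_nil]
    rw [hoff, hg]
    congr 1
    have hlen : s.length = full.length - off := by
      rw [← hoff, List.length_drop]
    exact List.take_of_length_le (by omega)
  | case2 s g t h ih =>
    intro full off hoff
    rw [pvSegs, h]
    have hs : s = g ++ ',' :: t := by
      have := pvNextGroup_some_eq 0 s t (by rw [h])
      rw [h] at this; exact this
    have haux : pvBpsAux 0 off s = (off + g.length + 1) :: pvBpsAux 0 (off + g.length + 1) t := by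
      rw [pvBpsAux_spec, h]
    rw [haux]
    have hdrop : full.drop (off + g.length + 1) = t := by
      have h1 : full.drop (off + g.length + 1) = (full.drop off).drop (g.length + 1) := by
        rw [List.drop_drop]; ring_nf
      rw [h1, hoff, hs, show g ++ ',' :: t = (g ++ [',']) ++ t by simp,
        List.drop_left' (by simp)]
    simp only [List.zip_cons_cons, List.cons_append, List.map_cons]
    rw [ih full (off + g.length + 1) hdrop]
    congr 1
    have harith : off + g.length + 1 - 1 - off = g.length := by omega
    rw [harith, hoff, hs]
    exact List.take_left' rfl

theorem pvSplitNodeStr_eq_segs (s : List Char) (hd : pvDepthOk 0 s = true) :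
    pvSplitNodeStr s = pvSegs s := by
  unfold pvSplitNodeStr
  have hb : (pvBpsLoop 0 [0] [] s).1 = [0] ++ pvBpsAux 0 0 s :=
    pvBpsLoop_eq s 0 [] 0 [0] (by simp) hd
  dsimp only
  rw [hb]
  simp only [List.cons_append, List.nil_append, List.tail_cons]
  rw [← pvSlices_eq_segs s s 0 (by simp)]
  refine List.map_congr_left ?_
  rintro ⟨i, j⟩ hmem
  have hj : 1 ≤ j := by
    rcases List.of_mem_zip hmem with ⟨_, hj2⟩
    rcases List.mem_append.mp hj2 with hja | hjb
    · exact pvBpsAux_pos s 0 0 j hja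
    · simp at hjb; omega
  have hcast : ((j : Int) - 1) = ((j - 1 : Nat) : Int) := by omega
  rw [hcast, PySem.List.slice_natCast]

-- pulling the accumulator out of a fold whose step only appends
theorem pvFoldl_pull {α : Type} (f : List String → α → List String)
    (hf : ∀ acc x, f acc x = acc ++ f [] x) :
    ∀ (l : List α) (acc : List String), l.foldl f acc = acc ++ l.foldl f [] := by
  intro l
  induction l with
  | nil => intro acc; simp
  | cons x l ih =>
    intro acc
    simp only [List.foldl_cons]
    rw [ih (f acc x), ih (f [] x), hf acc x, List.append_assoc]

-- pulling the `names` accumulator out of one group's expansion (both sides)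
theorem pvExpandSpecInto_pull (names : List String) (spec : List Char) :
    pvExpandSpecInto names spec = names ++ pvExpandSpecInto [] spec := by
  unfold pvExpandSpecInto
  split_ifs with hin
  · split
    · refine pvFoldl_pull _ ?_ _ _
      intro acc sub
      dsimp only
      split_ifs with hdash
      · split
        · split <;> simp
        · simp
      · simp
    · simp
  · simp

theorem pvExpandInto_pull (names : List String) (g : List Char) :
    pvExpandInto names g = names ++ pvExpandInto [] g := by
  unfold pvExpandInto
  split
  · simp
  · refine pvFoldl_pull _ ?_ _ _
    intro acc tok
    dsimp only
    split_ifs with hdash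
    · split
      · split <;> simp [PySem.List.foldl_append_singleton_eq_map]
      · simp
    · simp

-- the two expansions of one valid group agree
theorem pvExpand_eq (seg : List Char) (hok : pvSegOk seg = true) :
    pvExpandSpecInto [] seg = pvExpandInto [] seg := by
  unfold pvSegOk at hok
  by_cases hin : seg.contains '['
  · simp only [hin, Bool.not_true, Bool.false_or] at hok
    rcases hh : PySem.List.index? seg '[' with _ | h0
    · rw [PySem.List.index?_eq_none_iff] at hh
      exact absurd (by simpa using hin) hh
    rcases ht : PySem.List.index? seg ']' with _ | t0
    · rw [hh, ht] at hok; simp at hok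
    rw [hh, ht] at hok
    simp only [Bool.and_eq_true, decide_eq_true_eq, List.all_eq_true] at hok
    obtain ⟨hlt, hall⟩ := hok
    unfold pvExpandSpecInto pvExpandInto
    rw [pvIsIn_single, hh, ht, pvFind_single seg ']', ht]
    rw [if_neg (show ¬¬(seg.contains '[' = true) by simpa using hin)]
    dsimp only
    have hbody : PySem.List.slice seg (some ((h0 : Int) + 1)) (some (t0 : Int))
        = (seg.drop (h0 + 1)).take (t0 - (h0 + 1)) := by
      have hcast : ((h0 : Int) + 1) = ((h0 + 1 : Nat) : Int) := by push_cast; ring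
      rw [hcast, PySem.List.slice_natCast]
    rw [hbody]
    refine PySem.List.foldl_congr_mem _ _ _ _ ?_
    intro acc tok hmemtok
    have htok := hall tok hmemtok
    unfold pvTokOk at htok
    rw [pvIsIn_single]
    by_cases hd : tok.contains '-'
    · rw [if_neg (show ¬¬(tok.contains '-' = true) by simpa using hd),
        if_pos (show tok.contains '-' = true from hd)]
      simp only [hd, Bool.not_true, Bool.false_or] at htok
      rcases hsp : PySem.Chars.splitOn tok ['-'] with _ | ⟨st, _ | ⟨en, _ | _⟩⟩ <;>
        rw [hsp] at htok <;> try simp at htok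
      dsimp only
      rcases hsa : PySem.Int.ofChars? st with _ | a
      · rw [hsa] at htok
      rcases hsb : PySem.Int.ofChars? en with _ | b
      · rw [hsb] at htok
      dsimp only
      rw [PySem.List.foldl_append_singleton_eq_map]
    · rw [if_pos (show ¬(tok.contains '-' = true) by simpa using hd),
        if_neg (show ¬(tok.contains '-' = true) by simpa using hd)]
  · have hfalse : seg.contains '[' = false := by simpa using hin
    have hnm : '[' ∉ seg := by simpa using hfalse
    unfold pvExpandSpecInto pvExpandInto
    rw [pvIsIn_single, (PySem.List.index?_eq_none_iff seg '[').mpr hnm]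
    rw [if_pos (show ¬(seg.contains '[' = true) by simpa using hfalse)]

-- B's loop is the flatMap of the per-group expansion over the groups
theorem pvParseLoop_eq (s : List Char) : ∀ (names : List String),
    pvParseLoop s names = names ++ (pvSegs s).flatMap (fun g => pvExpandInto [] g) := by
  induction s using pvSegs.induct with
  | case1 s g h =>
    intro names
    rw [pvParseLoop, h, pvSegs, h]
    dsimp only
    simp [pvExpandInto_pull names g]
  | case2 s g t h ih =>
    intro names
    rw [pvParseLoop, h, pvSegs, h]
    dsimp only
    rw [ih (pvExpandInto names g), pvExpandInto_pull names g]
    simp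

-- A's pipeline is the flatMap of its per-spec expansion over the groups
theorem pvParseA_eq (s : List Char) (hd : pvDepthOk 0 s = true) :
    (pvSplitNodeStr s).foldl pvExpandSpecInto []
      = (pvSegs s).flatMap (fun g => pvExpandSpecInto [] g) := by
  rw [pvSplitNodeStr_eq_segs s hd]
  rw [show pvExpandSpecInto = fun ns spec => ns ++ pvExpandSpecInto [] spec from
    funext fun ns => funext fun spec => pvExpandSpecInto_pull ns spec]
  rw [PySem.List.foldl_append_eq_flatMap]
  simp

-- ===== VERDICT (by name: the statement is the Claim_ definition above) =====
theorem parse_node_names_spec : Claim_equal_parse_node_names := by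
  intro node_str _ hpre
  obtain ⟨hd, hall⟩ := hpre
  rw [pvSegsAux_eq_pvSegs] at hall
  unfold Spec_parse_node_names parse_node_names parse_node_names_alt
  rw [pvParseA_eq _ hd, pvParseLoop_eq]
  rw [List.nil_append]
  simp only [List.flatMap_def]
  congr 1
  refine List.map_congr_left ?_
  intro g hg
  exact pvExpand_eq g (List.all_eq_true.mp hall g hg)
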